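-- pv_equiv track=rewrite | github.com/hamfreebird/esolang_stardust | src/ide_py/ide.py | count_leading_spaces
-- ===== SOURCE A (Python) =====
-- def count_leading_spaces(row, col):
--     """返回第 col 列（符号位置）之前连续空格的数量。如果 col 位置是空格，返回 0。"""
--     if col >= len(row) or row[col]['char'] == ' ':
--         return 0
--     count = 0
--     i = col - 1
--     while i >= 0 and row[i]['char'] == ' ':
--         count += 1
--         i -= 1
--     return count
-- ===== SOURCE B (Python) =====
-- def count_leading_spaces(row, col):
--     """返回第 col 列（符号位置）之前连续空格的数量。如果 col 位置是空格，返回 0。"""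
--     if col <= 0 or col >= len(row) or row[col]['char'] == ' ':
--         return 0
--     run = 0
--     for cell in row[:col]:
--         run = run + 1 if cell.get('char') == ' ' else 0
--     return run
-- ===== Notes on version B (the rewrite author's own statement) =====
-- stated objective: alternative
-- what changed: Replaces the backward cell-by-cell while-loop with a single forward pass over the prefix row[:col] that maintains the current run of consecutive spaces (reset on any cell whose 'char' differs from ' ', read with dict.get), plus an explicit col <= 0 guard.
import Mathlib
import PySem

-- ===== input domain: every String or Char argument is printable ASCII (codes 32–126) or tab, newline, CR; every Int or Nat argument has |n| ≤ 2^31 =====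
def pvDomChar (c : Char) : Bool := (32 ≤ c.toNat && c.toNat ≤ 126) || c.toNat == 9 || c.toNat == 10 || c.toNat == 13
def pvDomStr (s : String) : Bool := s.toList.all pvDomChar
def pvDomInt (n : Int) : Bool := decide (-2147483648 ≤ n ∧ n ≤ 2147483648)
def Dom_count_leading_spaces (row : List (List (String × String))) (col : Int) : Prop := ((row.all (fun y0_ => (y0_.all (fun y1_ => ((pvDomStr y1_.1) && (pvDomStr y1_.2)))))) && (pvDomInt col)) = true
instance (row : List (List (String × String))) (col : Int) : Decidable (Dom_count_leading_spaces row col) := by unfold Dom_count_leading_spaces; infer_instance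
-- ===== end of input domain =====

-- B replaces A's backward while-loop with one forward pass over the prefix maintaining the
-- current run of spaces; same cost, alternative structure.

-- ===== PORT A =====
-- cell['char'] : first-match lookup in the association list (Python dict lookup)
def pvCharKey (cell : List (String × String)) : Option String :=
  (cell.find? (fun p => p.1 == "char")).map (fun p => p.2)

-- A's while-loop: clsA_loop row (j+1) inspects index j ('i' of the Python loop), counting down.
def clsA_loop (row : List (List (String × String))) : Nat → Int
  | 0 => 0
  | j+1 =>
    match row[j]? with
    | none => 0
    | some cell =>
      match pvCharKey cell with
      | none => 0          -- Python raises KeyError here; outside Pre_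
      | some ch => if ch = " " then 1 + clsA_loop row j else 0

def count_leading_spaces (row : List (List (String × String))) (col : Int) : Int :=
  if (row.length : Int) ≤ col then 0
  else
    match PySem.List.pyGet? row col with
    | none => 0            -- Python raises IndexError here; outside Pre_
    | some cell =>
      match pvCharKey cell with
      | none => 0          -- Python raises KeyError here; outside Pre_
      | some ch =>
        if ch = " " then 0
        else clsA_loop row col.toNat   -- loop from i = col-1 downward (col ≤ 0 ⇒ toNat = 0 ⇒ loop body never runs)

-- ===== PORT B =====
def count_leading_spaces_alt (row : List (List (String × String))) (col : Int) : Int :=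
  if col ≤ 0 ∨ (row.length : Int) ≤ col then 0
  else
    match PySem.List.pyGet? row col with
    | none => 0            -- unreachable here (0 < col < len)
    | some cell =>
      match pvCharKey cell with
      | none => 0          -- Python raises KeyError here; outside Pre_
      | some ch =>
        if ch = " " then 0
        else
          -- forward pass over row[:col]; cell.get('char') == ' ' is the single boolean test
          (PySem.List.slice row none (some col)).foldl
            (fun run c => if pvCharKey c == some " " then run + 1 else 0) 0

-- ===== PRECONDITION & SPEC =====
-- Pre_ excludes EXACTLY the inputs on which the Python A raises: IndexError when col < len(row)
-- but row[col] is out of range after negative-index wrap, and KeyError when a cell A actually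
-- reads (row[col], or a cell of the backward scan up to and including its stopping cell) has no
-- 'char' key.  Every input on which A returns a value satisfies Pre_.
def pvPreCLS (row : List (List (String × String))) (col : Int) : Bool :=
  if (row.length : Int) ≤ col then true
  else
    match PySem.List.pyGet? row col with
    | none => false
    | some cell =>
      match pvCharKey cell with
      | none => false
      | some ch =>
        ch == " " || decide (col ≤ 0) ||
          -- the first cell from the right of the prefix that is not a space cell (if any)
          -- must itself carry a 'char' key, since A reads it to stop the scan
          (((row.take col.toNat).reverse.dropWhile
              (fun c => pvCharKey c == some " ")).head?.all
            (fun c => (pvCharKey c).isSome))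

def Pre_count_leading_spaces (row : List (List (String × String))) (col : Int) : Prop :=
  pvPreCLS row col = true
instance (row : List (List (String × String))) (col : Int) : Decidable (Pre_count_leading_spaces row col) := by unfold Pre_count_leading_spaces; infer_instance

def pvWitness_count_leading_spaces : (List (List (String × String))) × Int :=
  ([[("char", " ")], [("char", " ")], [("char", "x")]], 2)

def Spec_count_leading_spaces (row : List (List (String × String))) (col : Int) (out : Int) : Prop := out = count_leading_spaces_alt row col
instance (row : List (List (String × String))) (col : Int) (out : Int) : Decidable (Spec_count_leading_spaces row col out) := by unfold Spec_count_leading_spaces; infer_instance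

-- ===== CLAIM (what is proved, stated in full; the proofs are below) =====
def Claim_equal_count_leading_spaces : Prop := ∀ (row : List (List (String × String))) (col : Int), Dom_count_leading_spaces row col → Pre_count_leading_spaces row col → Spec_count_leading_spaces row col (count_leading_spaces row col)

-- ===== LEMMAS AND PROOFS =====

-- B's run-maintaining forward fold computes the length of the trailing run of space cells.
theorem pv_fold_run (l : List (List (String × String))) (init : Int) :
    l.foldl (fun run c => if pvCharKey c == some " " then run + 1 else 0) init =
      if l.all (fun c => pvCharKey c == some " ")
      then init + l.length
      else ((l.reverse.takeWhile (fun c => pvCharKey c == some " ")).length : Int) := by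
  induction l using List.reverseRecOn generalizing init with
  | nil => simp
  | append_singleton l a ih =>
    rw [List.foldl_append]
    by_cases ha : pvCharKey a == some " "
    · simp only [List.foldl_cons, List.foldl_nil, ha, if_pos rfl, ih]
      by_cases hall : l.all (fun c => pvCharKey c == some " ")
      · simp only [hall, ha, List.takeWhile, if_true, List.reverse_append,
          List.reverse_cons, List.reverse_nil, List.nil_append, List.cons_append]
        simp [ha]
        rw [if_pos (by simpa using hall)]
        push_cast
        ring
      · simp [hall, ha, List.takeWhile]
    · simp only [List.foldl_cons, List.foldl_nil, ha, if_false, Bool.false_eq_true]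
      have ha' : pvCharKey a ≠ some " " := by simpa using ha
      simp [ha', List.takeWhile, beq_eq_false_iff_ne.mpr ha']

-- A's backward loop also computes the trailing-run length (the port maps KeyError to 0,
-- and a key-less cell is not a space cell, so this holds unconditionally).
theorem pv_loop_run (row : List (List (String × String))) :
    ∀ k : Nat, k ≤ row.length →
      clsA_loop row k =
        (((row.take k).reverse.takeWhile (fun c => pvCharKey c == some " ")).length : Int) := by
  intro k
  induction k with
  | zero => intro _; simp [clsA_loop]
  | succ j ih =>
    intro hk
    have hj : j < row.length := by omega
    have htake : row.take (j+1) = row.take j ++ [row[j]] := by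
      rw [List.take_add_one, List.getElem?_eq_getElem hj]; rfl
    rw [htake, List.reverse_append]
    simp only [List.reverse_cons, List.reverse_nil, List.nil_append, List.cons_append,
      List.nil_append] at *
    simp only [clsA_loop, List.getElem?_eq_getElem hj]
    cases hch : pvCharKey row[j] with
    | none => simp [List.takeWhile, hch]
    | some ch =>
      by_cases hs : ch = " "
      · simp [List.takeWhile, hch, hs, ih (by omega)]
        omega
      · simp [List.takeWhile, hch, hs, beq_eq_false_iff_ne.mpr hs]

-- ===== VERDICT (by name: the statement is the Claim_ definition above) =====
theorem count_leading_spaces_spec : Claim_equal_count_leading_spaces := by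
  unfold Claim_equal_count_leading_spaces
  intro row col _hdom _hpre
  unfold Spec_count_leading_spaces count_leading_spaces count_leading_spaces_alt
  by_cases hlen : (row.length : Int) ≤ col
  · simp [hlen]
  · by_cases hc0 : col ≤ 0
    · -- A: the loop body never runs (col.toNat = 0); B: the col ≤ 0 guard
      have h0 : col.toNat = 0 := Int.toNat_of_nonpos hc0
      rw [if_neg hlen, if_pos (Or.inl hc0)]
      cases hget : PySem.List.pyGet? row col with
      | none => simp [hget]
      | some cell =>
        cases hch : pvCharKey cell with
        | none => simp [hget, hch]
        | some ch =>
          by_cases hs : ch = " " <;> simp [hget, hch, hs, h0, clsA_loop]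
    · -- 0 < col < len(row)
      rw [if_neg hlen, if_neg (not_or.mpr ⟨hc0, hlen⟩)]
      cases hget : PySem.List.pyGet? row col with
      | none => simp [hget]
      | some cell =>
        cases hch : pvCharKey cell with
        | none => simp [hget, hch]
        | some ch =>
          by_cases hs : ch = " "
          · simp [hget, hch, hs]
          · simp only [hget, hch]
            have hle : col.toNat ≤ row.length := by omega
            have hslice : PySem.List.slice row none (some col) = row.take col.toNat :=
              PySem.List.slice_to row (by omega)
            simp only [if_neg hs, hslice, pv_fold_run, pv_loop_run row col.toNat hle]
            by_cases hall : (row.take col.toNat).all (fun c => pvCharKey c == some " ")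
            · have heq : (row.take col.toNat).reverse.takeWhile
                  (fun c => pvCharKey c == some " ") = (row.take col.toNat).reverse := by
                apply List.takeWhile_eq_self_iff.mpr
                intro c hc
                exact (List.all_eq_true.mp hall) c (List.mem_reverse.mp hc)
              simp [hall, heq]
            · simp [hall]
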